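-- pv_equiv track=rewrite | github.com/panyu1512/crypto-api | scraper/utils.py | get_crypto_abbreviation
-- ===== SOURCE A (Python) =====
-- def get_crypto_abbreviation(crypto_name: str) -> str:
--     """
--     Obtain the abbreviation of the cryptocurrencie
--     returns: str
--     """
--     abbreviation = ''
--     if crypto_name.isupper():
--         abbreviation = crypto_name[:len(crypto_name) // 2]
--     else:
--         for word in reversed(crypto_name):
--             if word.isupper():
--                 abbreviation = word + abbreviation
--             else:
--                 break
--
--     return abbreviation
-- ===== SOURCE B (Python) =====
-- def get_crypto_abbreviation(crypto_name: str) -> str: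
--     """
--     Obtain the abbreviation of the cryptocurrencie
--     returns: str
--     """
--     if crypto_name.isupper():
--         return crypto_name[:len(crypto_name) // 2]
--     cut = 0
--     for i, ch in enumerate(crypto_name):
--         if not ch.isupper():
--             cut = i + 1
--     return crypto_name[cut:]
-- ===== Notes on version B (the rewrite author's own statement) =====
-- stated objective: alternative
-- what changed: The trailing-uppercase run is found by a forward scan that records where the last non-uppercase character ends (then one suffix slice), instead of A's reverse iteration that prepends characters one by one until a break.
import Mathlib
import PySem

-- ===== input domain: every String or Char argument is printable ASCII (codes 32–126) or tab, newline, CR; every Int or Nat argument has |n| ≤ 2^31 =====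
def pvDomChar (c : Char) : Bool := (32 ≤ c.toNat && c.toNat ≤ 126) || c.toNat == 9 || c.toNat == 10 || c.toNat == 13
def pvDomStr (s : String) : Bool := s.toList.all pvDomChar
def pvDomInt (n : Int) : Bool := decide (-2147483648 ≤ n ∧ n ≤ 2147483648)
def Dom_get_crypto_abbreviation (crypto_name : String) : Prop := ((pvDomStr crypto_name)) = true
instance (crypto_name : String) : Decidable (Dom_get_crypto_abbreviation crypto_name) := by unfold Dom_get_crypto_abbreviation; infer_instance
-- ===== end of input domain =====

-- B finds the trailing uppercase run by a forward scan recording where the last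
-- non-uppercase character ends, then takes one suffix slice (objective: alternative,
-- same O(n) cost); A builds it by reverse iteration with prepending.

-- Python str.isupper(), ported by hand (exact on the ASCII domain: at least one
-- cased character and no lowercase one); shared by both ports like a primitive.
def pyStrIsupper (cs : List Char) : Bool :=
  cs.any PySem.Chars.isupper && cs.all (fun c => !PySem.Chars.islower c)

-- ===== PORT A =====
-- the 'for word in reversed(crypto_name): … else break' loop of A
def pvRevLoopA : List Char → List Char → List Char
  | [], acc => acc
  | c :: rest, acc => if PySem.Chars.isupper c then pvRevLoopA rest (c :: acc) else acc

def get_crypto_abbreviation (crypto_name : String) : String :=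
  if pyStrIsupper crypto_name.toList then
    String.ofList (PySem.List.slice crypto_name.toList none
      (some (PySem.Int.floordiv (PySem.Str.len crypto_name) 2)))
  else
    String.ofList (pvRevLoopA crypto_name.toList.reverse [])

-- ===== PORT B =====
def get_crypto_abbreviation_alt (crypto_name : String) : String :=
  if pyStrIsupper crypto_name.toList then
    String.ofList (PySem.List.slice crypto_name.toList none
      (some (PySem.Int.floordiv (PySem.Str.len crypto_name) 2)))
  else
    let cut := (PySem.List.enumerate crypto_name.toList 0).foldl
      (fun cut p => if !(PySem.Chars.isupper p.2) then p.1 + 1 else cut) 0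
    String.ofList (PySem.List.slice crypto_name.toList (some cut) none)

-- ===== PRECONDITION & SPEC =====
def Spec_get_crypto_abbreviation (crypto_name : String) (out : String) : Prop := out = get_crypto_abbreviation_alt crypto_name
instance (crypto_name : String) (out : String) : Decidable (Spec_get_crypto_abbreviation crypto_name out) := by unfold Spec_get_crypto_abbreviation; infer_instance

-- ===== CLAIM (what is proved, stated in full; the proofs are below) =====
def Claim_equal_get_crypto_abbreviation : Prop := ∀ (crypto_name : String), Dom_get_crypto_abbreviation crypto_name → Spec_get_crypto_abbreviation crypto_name (get_crypto_abbreviation crypto_name)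

-- ===== LEMMAS AND PROOFS =====

-- length of the maximal non-uppercase-terminated prefix: cs.drop (pvCut cs) is the
-- longest all-uppercase suffix of cs
def pvCut : List Char → Nat
  | [] => 0
  | c :: cs => if pvCut cs = 0 then (if PySem.Chars.isupper c then 0 else 1) else pvCut cs + 1

theorem pvRevLoopA_eq (rs acc : List Char) :
    pvRevLoopA rs acc = (rs.takeWhile PySem.Chars.isupper).reverse ++ acc := by
  induction rs generalizing acc with
  | nil => simp [pvRevLoopA]
  | cons c rest ih =>
    by_cases h : PySem.Chars.isupper c = true
    · simp [pvRevLoopA, h, ih]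
    · simp [pvRevLoopA, h]

theorem pvCut_zero_iff (cs : List Char) :
    pvCut cs = 0 ↔ ∀ x ∈ cs, PySem.Chars.isupper x = true := by
  induction cs with
  | nil => simp [pvCut]
  | cons c cs ih =>
    by_cases h0 : pvCut cs = 0 <;> by_cases hc : PySem.Chars.isupper c = true <;>
      simp [pvCut, h0, hc, ih.symm]

theorem pvCut_takeWhile (cs : List Char) :
    (cs.reverse.takeWhile PySem.Chars.isupper).reverse = cs.drop (pvCut cs) := by
  induction cs with
  | nil => simp
  | cons c cs ih =>
    have hlen : ((cs.reverse.takeWhile PySem.Chars.isupper).length = cs.reverse.length) ↔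
        pvCut cs = 0 := by
      rw [pvCut_zero_iff]
      constructor
      · intro h
        have heq := (List.takeWhile_prefix (l := cs.reverse)
          (p := PySem.Chars.isupper)).eq_of_length h
        intro x hx
        have hx' : x ∈ cs.reverse.takeWhile PySem.Chars.isupper := by
          rw [heq]; simpa using hx
        exact List.mem_takeWhile_imp hx'
      · intro h
        have : cs.reverse.takeWhile PySem.Chars.isupper = cs.reverse :=
          List.takeWhile_eq_self_iff.mpr (by intro x hx; exact h x (by simpa using hx))
        rw [this]
    rw [List.reverse_cons, List.takeWhile_append]
    by_cases h0 : pvCut cs = 0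
    · rw [if_pos (hlen.mpr h0)]
      by_cases hc : PySem.Chars.isupper c = true
      · have hpv : pvCut (c :: cs) = 0 := by simp [pvCut, h0, hc]
        simp [hc, hpv]
      · have hpv : pvCut (c :: cs) = 1 := by simp [pvCut, h0, hc]
        simp [hc, hpv]
    · rw [if_neg (fun h => h0 (hlen.mp h))]
      have hpv : pvCut (c :: cs) = pvCut cs + 1 := by simp [pvCut, h0]
      rw [hpv, List.drop_succ_cons, ih]

theorem pvFoldl_enumerate (cs : List Char) (s init : Int) :
    (PySem.List.enumerate cs s).foldl
      (fun cut p => if !(PySem.Chars.isupper p.2) then p.1 + 1 else cut) init =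
    if pvCut cs = 0 then init else s + pvCut cs := by
  induction cs generalizing s init with
  | nil => simp [PySem.List.enumerate_nil, pvCut]
  | cons c cs ih =>
    rw [PySem.List.enumerate_cons]
    simp only [List.foldl_cons]
    rw [ih]
    by_cases h0 : pvCut cs = 0 <;> by_cases hc : PySem.Chars.isupper c = true <;>
      simp [pvCut, h0, hc] <;> omega

-- ===== VERDICT (by name: the statement is the Claim_ definition above) =====
theorem get_crypto_abbreviation_spec : Claim_equal_get_crypto_abbreviation := by
  intro s _
  unfold Spec_get_crypto_abbreviation get_crypto_abbreviation get_crypto_abbreviation_alt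
  by_cases h : pyStrIsupper s.toList = true
  · simp [h]
  · simp only [h, Bool.false_eq_true, if_false]
    have hcut : (PySem.List.enumerate s.toList 0).foldl
        (fun cut p => if !(PySem.Chars.isupper p.2) then p.1 + 1 else cut) 0 =
        ((pvCut s.toList : Int)) := by
      rw [pvFoldl_enumerate]
      by_cases h0 : pvCut s.toList = 0 <;> simp [h0]
    rw [hcut, PySem.List.slice_from_natCast, pvRevLoopA_eq, List.append_nil,
      pvCut_takeWhile]
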